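-- pv_equiv track=rewrite | github.com/Javil01/inbxr- | modules/list_triage.py | _find_csv_column
-- ===== SOURCE A (Python) =====
-- def _find_csv_column(row, concept):
--     """Match flexible CSV column names to the fields we care about."""
--     aliases = {
--         "email": ["email", "email_address", "e-mail", "mail"],
--         "last_open_date": [
--             "last_open", "last_opened", "last_open_date", "last_open_at",
--             "last open date", "opened_at",
--         ],
--         "last_click_date": [
--             "last_click", "last_clicked", "last_click_date", "last_click_at",
--             "last click date", "clicked_at",
--         ],
--         "last_reply_date": [
--             "last_reply", "last_replied", "last_reply_date", "replied_at",
--         ],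
--         "acquisition_date": [
--             "acquisition_date", "date_added", "signup_date", "joined",
--             "created_at", "added_at", "signed_up",
--         ],
--     }
--     wanted = aliases.get(concept, [concept])
--     # Build a lowercase-stripped lookup of the row
--     norm = {(k or "").strip().lower().replace(" ", "_"): v for k, v in row.items()}
--     for alias in wanted:
--         key = alias.lower().replace(" ", "_")
--         if key in norm and norm[key] not in (None, ""):
--             return norm[key]
--     return None
-- ===== SOURCE B (Python) =====
-- def _find_csv_column(row, concept):
--     """Match flexible CSV column names to the fields we care about."""
--     aliases = {
--         "email": ["email", "email_address", "e-mail", "mail"],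
--         "last_open_date": [
--             "last_open", "last_opened", "last_open_date", "last_open_at",
--             "last open date", "opened_at",
--         ],
--         "last_click_date": [
--             "last_click", "last_clicked", "last_click_date", "last_click_at",
--             "last click date", "clicked_at",
--         ],
--         "last_reply_date": [
--             "last_reply", "last_replied", "last_reply_date", "replied_at",
--         ],
--         "acquisition_date": [
--             "acquisition_date", "date_added", "signup_date", "joined",
--             "created_at", "added_at", "signed_up",
--         ],
--     }
--     wanted = aliases.get(concept, [concept])
--     # Priority of each normalized header we accept (earliest alias wins).
--     rank = {}
--     for i, alias in enumerate(wanted):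
--         rank.setdefault(alias.lower().replace(" ", "_"), i)
--     # One pass over the row, recording the value seen for each priority.
--     best = {}
--     for k, v in row.items():
--         i = rank.get((k or "").strip().lower().replace(" ", "_"))
--         if i is not None:
--             best[i] = v
--     for i in range(len(wanted)):
--         v = best.get(i)
--         if v not in (None, ""):
--             return v
--     return None
-- ===== Notes on version B (the rewrite author's own statement) =====
-- stated objective: alternative
-- what changed: Inverts the loops: instead of normalizing the whole row into a lookup dict and probing it alias by alias, B precomputes a priority rank for each normalized alias, makes a single pass over the row recording the value seen at each priority, and then returns the first priority with a non-empty value.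
import Mathlib
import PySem

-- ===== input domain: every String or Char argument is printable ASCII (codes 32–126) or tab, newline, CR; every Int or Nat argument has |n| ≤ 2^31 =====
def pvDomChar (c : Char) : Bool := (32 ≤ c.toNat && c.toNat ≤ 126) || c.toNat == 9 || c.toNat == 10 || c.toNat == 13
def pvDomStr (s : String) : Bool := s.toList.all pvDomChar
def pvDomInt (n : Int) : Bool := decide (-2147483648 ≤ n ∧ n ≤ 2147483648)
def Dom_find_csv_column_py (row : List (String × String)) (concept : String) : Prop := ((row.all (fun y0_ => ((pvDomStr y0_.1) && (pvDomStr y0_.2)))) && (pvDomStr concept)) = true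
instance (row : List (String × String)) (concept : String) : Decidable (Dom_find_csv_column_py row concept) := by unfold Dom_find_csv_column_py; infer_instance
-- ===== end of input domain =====

-- B inverts A's loops: a priority rank per normalized alias, one pass over the row recording the
-- value at each priority, then the first priority with a non-empty value (objective: alternative).


-- shared literal data of both Pythons: the aliases table and the two normalizations
def pvAliases : PySem.Dict String (List String) := PySem.Dict.ofList [
  ("email", ["email", "email_address", "e-mail", "mail"]),
  ("last_open_date", ["last_open", "last_opened", "last_open_date", "last_open_at",
      "last open date", "opened_at"]),
  ("last_click_date", ["last_click", "last_clicked", "last_click_date", "last_click_at",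
      "last click date", "clicked_at"]),
  ("last_reply_date", ["last_reply", "last_replied", "last_reply_date", "replied_at"]),
  ("acquisition_date", ["acquisition_date", "date_added", "signup_date", "joined",
      "created_at", "added_at", "signed_up"])]

-- (k or "").strip().lower().replace(" ", "_")  ('k or ""' is the identity on str: "" stays "")
def pvNormKey (k : String) : String :=
  PySem.Str.replace (PySem.Str.lower (PySem.Str.strip k)) " " "_"

-- alias.lower().replace(" ", "_")
def pvAliasKey (a : String) : String :=
  PySem.Str.replace (PySem.Str.lower a) " " "_"

-- ===== PORT A =====
-- the 'for alias in wanted' loop over the prebuilt dict norm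
def pvLoopA (norm : PySem.Dict String String) : List String → Option String
  | [] => none
  | a :: rest =>
      let key := pvAliasKey a
      match norm.get? key with
      | some v => if v = "" then pvLoopA norm rest else some v
      | none => pvLoopA norm rest

def find_csv_column_py (row : List (String × String)) (concept : String) : Option String :=
  let wanted := (pvAliases.get? concept).getD [concept]
  -- norm = {(k or "").strip().lower().replace(" ", "_"): v for k, v in row.items()}
  let norm : PySem.Dict String String :=
    row.foldl (fun d p => d.insert (pvNormKey p.1) p.2) PySem.Dict.empty
  pvLoopA norm wanted

-- ===== PORT B =====
-- for i, alias in enumerate(wanted): rank.setdefault(alias.lower().replace(" ", "_"), i)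
def pvRankFrom (i : Nat) (l : List String) (d : PySem.Dict String Nat) : PySem.Dict String Nat :=
  match l with
  | [] => d
  | a :: rest => pvRankFrom (i + 1) rest (d.setdefault (pvAliasKey a) i)

-- for k, v in row.items(): i = rank.get(norm(k)); if i is not None: best[i] = v
def pvBest (rank : PySem.Dict String Nat) (row : List (String × String)) : PySem.Dict Nat String :=
  row.foldl (fun b p =>
    match rank.get? (pvNormKey p.1) with
    | some i => b.insert i p.2
    | none => b) PySem.Dict.empty

-- for i in range(len(wanted)): v = best.get(i); if v not in (None, ""): return v
def pvPickB (best : PySem.Dict Nat String) : List Nat → Option String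
  | [] => none
  | i :: rest =>
      match best.get? i with
      | some v => if v = "" then pvPickB best rest else some v
      | none => pvPickB best rest

def find_csv_column_py_alt (row : List (String × String)) (concept : String) : Option String :=
  let wanted := (pvAliases.get? concept).getD [concept]
  let rank := pvRankFrom 0 wanted PySem.Dict.empty
  let best := pvBest rank row
  pvPickB best (List.range wanted.length)

-- ===== PRECONDITION & SPEC =====
def Spec_find_csv_column_py (row : List (String × String)) (concept : String) (out : Option String) : Prop := out = find_csv_column_py_alt row concept
instance (row : List (String × String)) (concept : String) (out : Option String) : Decidable (Spec_find_csv_column_py row concept out) := by unfold Spec_find_csv_column_py; infer_instance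

-- ===== CLAIM =====
def Claim_equal_find_csv_column_py : Prop := ∀ (row : List (String × String)) (concept : String), Dom_find_csv_column_py row concept → Spec_find_csv_column_py row concept (find_csv_column_py row concept)

-- ===== LEMMAS AND PROOFS =====

-- first index of k in a list (specification device for rank/setdefault)
def pvFirstIdx (k : String) : List String → Option Nat
  | [] => none
  | b :: t => if b = k then some 0 else (pvFirstIdx k t).map (· + 1)

theorem pvFirstIdx_get {k : String} : ∀ {l : List String} {i : Nat},
    pvFirstIdx k l = some i → l[i]? = some k := by
  intro l
  induction l with
  | nil => intro i h; simp [pvFirstIdx] at h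
  | cons b t ih =>
      intro i h
      simp only [pvFirstIdx] at h
      by_cases hb : b = k
      · simp [hb] at h; subst h; simp [hb]
      · simp only [if_neg hb] at h
        cases ht : pvFirstIdx k t with
        | none => rw [ht] at h; simp at h
        | some i' =>
            rw [ht] at h; simp at h
            subst h
            simpa using ih ht

theorem pvFirstIdx_le {k : String} : ∀ {l : List String} {j : Nat},
    l[j]? = some k → ∃ i, pvFirstIdx k l = some i ∧ i ≤ j := by
  intro l
  induction l with
  | nil => intro j h; simp at h
  | cons b t ih =>
      intro j h
      by_cases hb : b = k
      · exact ⟨0, by simp [pvFirstIdx, hb], Nat.zero_le _⟩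
      · cases j with
        | zero => simp at h; exact absurd h hb
        | succ j' =>
            simp at h
            obtain ⟨i, hi, hle⟩ := ih h
            exact ⟨i + 1, by simp [pvFirstIdx, hb, hi], Nat.succ_le_succ hle⟩

-- rank.setdefault build = first-index lookup on the normalized alias keys
theorem pvRank_get? : ∀ (l : List String) (i : Nat) (d : PySem.Dict String Nat) (k : String),
    (pvRankFrom i l d).get? k
      = (d.get? k).or ((pvFirstIdx k (l.map pvAliasKey)).map (· + i)) := by
  intro l
  induction l with
  | nil => intro i d k; simp [pvRankFrom, pvFirstIdx]
  | cons a rest ih =>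
      intro i d k
      simp only [pvRankFrom, List.map_cons, pvFirstIdx]
      rw [ih]
      by_cases hk : pvAliasKey a = k
      · subst hk
        rw [PySem.Dict.get?_setdefault_self]
        cases d.get? (pvAliasKey a) <;> simp [Option.or]
      · rw [PySem.Dict.get?_setdefault_of_ne d i (Ne.symm hk)]
        simp only [if_neg hk]
        cases pvFirstIdx k (rest.map pvAliasKey) with
        | none => simp
        | some x =>
            have hx : x + 1 + i = x + (i + 1) := by omega
            simp [hx]

-- A's dict build followed by a lookup IS a last-match scan over the row
theorem pv_get_fold_eq_scan (row : List (String × String)) (key : String)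
    (d : PySem.Dict String String) :
    (row.foldl (fun d p => d.insert (pvNormKey p.1) p.2) d).get? key
      = row.foldl (fun found p => if pvNormKey p.1 = key then some p.2 else found) (d.get? key) := by
  induction row generalizing d with
  | nil => rfl
  | cons p t ih =>
      simp only [List.foldl_cons]
      rw [ih, PySem.Dict.get?_insert]
      by_cases h : pvNormKey p.1 = key
      · simp [h]
      · simp [h, Ne.symm h]

-- B's best build followed by a lookup is a last-match scan on the rank condition
theorem pvBest_get?_scan (rank : PySem.Dict String Nat) (row : List (String × String)) (i : Nat) :
    ∀ (b0 : PySem.Dict Nat String),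
    (row.foldl (fun b p =>
        match rank.get? (pvNormKey p.1) with
        | some j => b.insert j p.2
        | none => b) b0).get? i
      = row.foldl (fun found p =>
          if rank.get? (pvNormKey p.1) = some i then some p.2 else found) (b0.get? i) := by
  induction row with
  | nil => intro b0; rfl
  | cons p t ih =>
      intro b0
      simp only [List.foldl_cons]
      cases hr : rank.get? (pvNormKey p.1) with
      | none => rw [ih]; simp
      | some j =>
          rw [ih, PySem.Dict.get?_insert]
          by_cases hj : j = i
          · simp [hj]
          · simp [hj, Ne.symm hj]

-- the generic alias-probing loop, abstracted over the lookup
def pvLoopK (f : String → Option String) : List String → Option String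
  | [] => none
  | k :: rest =>
      match f k with
      | some v => if v = "" then pvLoopK f rest else some v
      | none => pvLoopK f rest

theorem pvLoopA_eq_loopK (norm : PySem.Dict String String) : ∀ (l : List String),
    pvLoopA norm l = pvLoopK (fun k => norm.get? k) (l.map pvAliasKey) := by
  intro l
  induction l with
  | nil => rfl
  | cons a rest ih =>
      simp only [pvLoopA, List.map_cons, pvLoopK]
      cases norm.get? (pvAliasKey a) <;> simp [ih]

-- the heart: picking by priorities 0..n-1 equals probing the alias keys in order
theorem pvRun (f : String → Option String) (keys : List String) (best : PySem.Dict Nat String)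
    (hg : ∀ j (h : j < keys.length),
        best.get? j = if pvFirstIdx (keys[j]'h) keys = some j then f (keys[j]'h) else none) :
    ∀ (m j : Nat), m = keys.length - j →
      (∀ i (hi : i < keys.length), i < j → ∀ v, f (keys[i]'hi) = some v → v = "") →
      pvPickB best (List.range' j m) = pvLoopK f (keys.drop j) := by
  intro m
  induction m with
  | zero =>
      intro j hm _
      have : keys.length ≤ j := by omega
      simp [List.drop_eq_nil_of_le this, pvPickB, pvLoopK]
  | succ m ih =>
      intro j hm H
      have hj : j < keys.length := by omega
      rw [List.range'_succ, List.drop_eq_getElem_cons hj]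
      simp only [pvPickB, pvLoopK]
      rw [hg j hj]
      have Hext_of : (∀ v, f (keys[j]'hj) = some v → v = "") →
          (∀ i (hi : i < keys.length), i < j + 1 → ∀ v, f (keys[i]'hi) = some v → v = "") := by
        intro hjv i hi hlt v hv
        rcases Nat.lt_succ_iff_lt_or_eq.mp hlt with h | h
        · exact H i hi h v hv
        · subst h; exact hjv v hv
      by_cases hfi : pvFirstIdx (keys[j]'hj) keys = some j
      · rw [if_pos hfi]
        cases hfv : f (keys[j]'hj) with
        | none =>
            exact ih (j + 1) (by omega) (Hext_of (by intro v hv; rw [hfv] at hv; cases hv))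
        | some v =>
            by_cases hv : v = ""
            · simp only [if_pos hv]
              exact ih (j + 1) (by omega)
                (Hext_of (by intro w hw; rw [hfv] at hw; cases hw; exact hv))
            · simp [hv]
      · rw [if_neg hfi]
        -- keys[j] repeats an earlier key, whose probe H says is empty/absent
        obtain ⟨i0, hi0, hle⟩ := pvFirstIdx_le (k := keys[j]'hj) (l := keys)
          (List.getElem?_eq_getElem hj)
        have hne : i0 ≠ j := fun h => hfi (h ▸ hi0)
        have hi0lt : i0 < keys.length := by
          have := pvFirstIdx_get hi0
          by_contra hc
          rw [List.getElem?_eq_none (by omega)] at this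
          cases this
        have hkeq : keys[i0]'hi0lt = keys[j]'hj := by
          have := pvFirstIdx_get hi0
          rw [List.getElem?_eq_getElem hi0lt] at this
          exact Option.some.inj this
        have hjv : ∀ v, f (keys[j]'hj) = some v → v = "" := by
          intro v hv
          exact H i0 hi0lt (by omega) v (by rw [hkeq]; exact hv)
        cases hfv : f (keys[j]'hj) with
        | none => exact ih (j + 1) (by omega) (Hext_of hjv)
        | some v =>
            have hv : v = "" := hjv v hfv
            simp only [if_pos hv]
            exact ih (j + 1) (by omega) (Hext_of hjv)

-- last-match scans with pointwise-equivalent conditions agree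
theorem pvScan_congr (rank : PySem.Dict String Nat) (j : Nat) (K : String)
    (hcond : ∀ k, rank.get? k = some j ↔ k = K) :
    ∀ (l : List (String × String)) (init : Option String),
    l.foldl (fun found p => if rank.get? (pvNormKey p.1) = some j then some p.2 else found) init
      = l.foldl (fun found p => if pvNormKey p.1 = K then some p.2 else found) init := by
  intro l
  induction l with
  | nil => intro init; simp only [List.foldl_nil]
  | cons p t iht =>
      intro init
      simp only [List.foldl_cons]
      rw [iht]
      by_cases hp : pvNormKey p.1 = K
      · rw [if_pos ((hcond _).mpr hp), if_pos hp]
      · rw [if_neg (fun h => hp ((hcond _).mp h)), if_neg hp]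

-- a last-match scan whose condition never fires returns its initial value
theorem pvScan_none (rank : PySem.Dict String Nat) (j : Nat)
    (h : ∀ k, rank.get? k ≠ some j) :
    ∀ (l : List (String × String)) (init : Option String),
    l.foldl (fun found p => if rank.get? (pvNormKey p.1) = some j then some p.2 else found) init
      = init := by
  intro l
  induction l with
  | nil => intro init; simp only [List.foldl_nil]
  | cons p t iht =>
      intro init
      simp only [List.foldl_cons]
      rw [if_neg (h _), iht]

-- best.get? j, characterized through first indices (the hg hypothesis of pvRun)
theorem pvBest_char (wanted : List String) (row : List (String × String))
    (j : Nat) (hj : j < (wanted.map pvAliasKey).length) :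
    (pvBest (pvRankFrom 0 wanted PySem.Dict.empty) row).get? j
      = if pvFirstIdx ((wanted.map pvAliasKey)[j]'hj) (wanted.map pvAliasKey) = some j
        then (row.foldl (fun d p => d.insert (pvNormKey p.1) p.2) PySem.Dict.empty).get?
               ((wanted.map pvAliasKey)[j]'hj)
        else none := by
  have hrank : ∀ k, (pvRankFrom 0 wanted PySem.Dict.empty).get? k
      = pvFirstIdx k (wanted.map pvAliasKey) := by
    intro k
    rw [pvRank_get?, PySem.Dict.get?_empty]
    cases pvFirstIdx k (wanted.map pvAliasKey) <;> simp [Option.or]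
  unfold pvBest
  rw [pvBest_get?_scan, PySem.Dict.get?_empty]
  by_cases hfi : pvFirstIdx ((wanted.map pvAliasKey)[j]'hj) (wanted.map pvAliasKey) = some j
  · rw [if_pos hfi, pv_get_fold_eq_scan, PySem.Dict.get?_empty]
    refine pvScan_congr _ j _ ?_ row none
    intro k
    rw [hrank]
    constructor
    · intro h
      have := pvFirstIdx_get h
      rw [List.getElem?_eq_getElem hj] at this
      exact (Option.some.inj this).symm
    · intro h; rw [h]; exact hfi
  · rw [if_neg hfi]
    refine pvScan_none _ j ?_ row none
    intro k h
    rw [hrank] at h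
    have := pvFirstIdx_get h
    rw [List.getElem?_eq_getElem hj] at this
    exact hfi ((Option.some.inj this) ▸ h)

-- A's whole pipeline equals B's whole pipeline, for any alias list
set_option maxHeartbeats 1000000 in
theorem pvMain (wanted : List String) (row : List (String × String)) :
    pvLoopA (row.foldl (fun d p => d.insert (pvNormKey p.1) p.2) PySem.Dict.empty) wanted
      = pvPickB (pvBest (pvRankFrom 0 wanted PySem.Dict.empty) row)
          (List.range wanted.length) := by
  have hlen : (wanted.map pvAliasKey).length = wanted.length := by simp
  rw [pvLoopA_eq_loopK, List.range_eq_range', ← hlen]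
  have h := pvRun
      (fun k => (row.foldl (fun d p => d.insert (pvNormKey p.1) p.2) PySem.Dict.empty).get? k)
      (wanted.map pvAliasKey) (pvBest (pvRankFrom 0 wanted PySem.Dict.empty) row)
      (fun j hjl => pvBest_char wanted row j hjl)
      (wanted.map pvAliasKey).length 0 (by omega) (by intro i hi h; omega)
  simpa using h.symm

-- ===== VERDICT =====
theorem find_csv_column_py_spec : Claim_equal_find_csv_column_py := by
  intro row concept _
  unfold Spec_find_csv_column_py find_csv_column_py find_csv_column_py_alt
  exact pvMain ((pvAliases.get? concept).getD [concept]) row
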